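-- pv_equiv track=rewrite | github.com/Jiangnanwa/UIAutotest | common/string_operations.py | has_invalid_values
-- ===== SOURCE A (Python) =====
-- def has_invalid_values(input_str):
--     fields = input_str.split('\n')
--     for field in fields:
--         key_value = field.split('=')
--         if len(key_value) == 2:
--             _, value = key_value
--             if value in ["null", ""]:
--                 return True
--     return False
-- ===== SOURCE B (Python) =====
-- def has_invalid_values(input_str):
--     # One pass over the characters: per line, count '=' signs and keep the
--     # text after the last '='; at each line end, flag eq-count 1 with value
--     # '' or 'null'. No split/tokenize, no intermediate lists.
--     eq = 0
--     val = ""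
--     for ch in input_str + "\n":
--         if ch == "\n":
--             if eq == 1 and val in ("", "null"):
--                 return True
--             eq = 0
--             val = ""
--         elif ch == "=":
--             eq += 1
--             val = ""
--         else:
--             val += ch
--     return False
-- ===== Notes on version B (the rewrite author's own statement) =====
-- stated objective: alternative
-- what changed: Replaced the split-by-newline / split-by-'=' tokenizer with a single character-by-character state machine that counts '=' signs per line and tracks the text after the last '=', deciding at each line boundary; no split calls or intermediate lists.
import Mathlib
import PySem

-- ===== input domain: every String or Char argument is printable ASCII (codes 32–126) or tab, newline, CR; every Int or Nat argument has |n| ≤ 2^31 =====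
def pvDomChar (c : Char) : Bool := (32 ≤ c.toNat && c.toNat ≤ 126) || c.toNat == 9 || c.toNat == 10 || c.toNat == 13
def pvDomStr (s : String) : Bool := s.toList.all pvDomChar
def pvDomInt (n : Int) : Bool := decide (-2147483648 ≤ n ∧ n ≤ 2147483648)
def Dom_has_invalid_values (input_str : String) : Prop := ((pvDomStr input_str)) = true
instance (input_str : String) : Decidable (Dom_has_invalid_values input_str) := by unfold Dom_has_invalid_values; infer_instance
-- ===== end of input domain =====

-- B is an alternative single-pass character state machine (no split calls), proved equal to A on all inputs.

-- ===== PORT A =====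
-- A: split the string on '\n'; for each field split on '='; if exactly two
-- parts and the value is "null" or "", return True; else False.
def has_invalid_values (input_str : String) : Bool :=
  let fields := PySem.Chars.splitOn input_str.toList ['\n']
  fields.any (fun field =>
    let key_value := PySem.Chars.splitOn field ['=']
    match key_value with
    | [_, value] => decide (value = "null".toList ∨ value = [])
    | _ => false)

-- ===== PORT B =====
-- B's loop state: (found, eq-count on current line, value chars after the last '=').
def altStep (st : Bool × Int × List Char) (ch : Char) : Bool × Int × List Char :=
  if st.1 then st
  else if ch = '\n' then
    if st.2.1 = 1 ∧ (st.2.2 = [] ∨ st.2.2 = "null".toList) then (true, 0, [])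
    else (false, 0, [])
  else if ch = '=' then (st.1, st.2.1 + 1, [])
  else (st.1, st.2.1, st.2.2 ++ [ch])

def has_invalid_values_alt (input_str : String) : Bool :=
  ((input_str.toList ++ ['\n']).foldl altStep (false, 0, [])).1

-- ===== PRECONDITION & SPEC =====
def Spec_has_invalid_values (input_str : String) (out : Bool) : Prop := out = has_invalid_values_alt input_str
instance (input_str : String) (out : Bool) : Decidable (Spec_has_invalid_values input_str out) := by unfold Spec_has_invalid_values; infer_instance

-- ===== CLAIM (what is proved, stated in full; the proofs are below) =====
def Claim_equal_has_invalid_values : Prop := ∀ (input_str : String), Dom_has_invalid_values input_str → Spec_has_invalid_values input_str (has_invalid_values input_str)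

-- ===== LEMMAS AND PROOFS =====

-- simple structural recursion computing s.split(sep) for a one-char sep
def mySplit (sep : Char) : List Char → List (List Char)
  | [] => [[]]
  | c :: rest =>
    if c = sep then [] :: mySplit sep rest
    else
      match mySplit sep rest with
      | [] => [[c]]
      | h :: t => (c :: h) :: t

theorem mySplit_ne_nil (sep : Char) (l : List Char) : mySplit sep l ≠ [] := by
  cases l with
  | nil => simp [mySplit]
  | cons c rest =>
    simp only [mySplit]
    split
    · simp
    · split <;> simp_all

theorem splitOn_go_spec (sep : Char) (l : List Char) :
    ∀ fuel cur acc, l.length < fuel →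
      PySem.Chars.splitOn.go [sep] fuel l cur acc =
        acc.reverse ++ (match mySplit sep l with
          | [] => [cur.reverse]
          | h :: t => (cur.reverse ++ h) :: t) := by
  induction l with
  | nil =>
    intro fuel cur acc hf
    cases fuel with
    | zero => omega
    | succ f => simp [PySem.Chars.splitOn.go, mySplit]
  | cons c rest ih =>
    intro fuel cur acc hf
    cases fuel with
    | zero => simp at hf
    | succ f =>
      by_cases hc : c = sep
      · subst hc
        have hpre : List.isPrefixOf [c] (c :: rest) = true := by
          simp [List.isPrefixOf]
        rw [PySem.Chars.splitOn.go]
        simp only [hpre, if_pos]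
        have hlen : rest.length < f := by simp at hf; omega
        rw [show List.drop (List.length [c]) (c :: rest) = rest by simp]
        rw [ih f [] (cur.reverse :: acc) hlen]
        have hne := mySplit_ne_nil c rest
        cases hms : mySplit c rest with
        | nil => exact absurd hms hne
        | cons h t => simp [mySplit, hms]
      · have hpre : List.isPrefixOf [sep] (c :: rest) = false := by
          simp [List.isPrefixOf]
          exact fun h => absurd h.symm hc
        rw [PySem.Chars.splitOn.go]
        simp only [hpre]
        have hlen : rest.length < f := by simp at hf; omega
        rw [if_neg (by simp)]
        rw [ih f (c :: cur) acc hlen]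
        have hne := mySplit_ne_nil sep rest
        cases hms : mySplit sep rest with
        | nil => exact absurd hms hne
        | cons h t => simp [mySplit, hc, hms]

theorem splitOn_eq_mySplit (sep : Char) (l : List Char) :
    PySem.Chars.splitOn l [sep] = mySplit sep l := by
  have h := splitOn_go_spec sep l (l.length + 1) [] [] (by omega)
  have hne := mySplit_ne_nil sep l
  rw [PySem.Chars.splitOn] at *
  cases hms : mySplit sep l with
  | nil => exact absurd hms hne
  | cons h' t => simp [hms] at h; simpa using h

-- line-local processing of B's state (eq count, value chars) over the chars of a field
def stepLine (e : Int) (v : List Char) : List Char → Int × List Char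
  | [] => (e, v)
  | c :: rest =>
    if c = '=' then stepLine (e + 1) [] rest
    else stepLine e (v ++ [c]) rest

def badSt (e : Int) (v : List Char) : Bool :=
  if e = 1 ∧ (v = [] ∨ v = "null".toList) then true else false

-- B's verdict over the field list, threading the partial line state into the first field
def chk (e : Int) (v : List Char) : List (List Char) → Bool
  | [] => false
  | f :: rest =>
    let st := stepLine e v f
    badSt st.1 st.2 || chk 0 [] rest

theorem foldl_altStep_found (xs : List Char) (e : Int) (v : List Char) :
    xs.foldl altStep (true, e, v) = (true, e, v) := by
  induction xs with
  | nil => rfl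
  | cons c rest ih => simp [altStep, ih]

theorem altStep_nl (e : Int) (v : List Char) :
    altStep (false, e, v) '\n' = (badSt e v, 0, []) := by
  unfold altStep badSt
  split_ifs <;> simp_all

theorem foldl_altStep_chk (l : List Char) :
    ∀ e v, ((l ++ ['\n']).foldl altStep (false, e, v)).1 =
      chk e v (mySplit '\n' l) := by
  induction l with
  | nil =>
    intro e v
    simp only [List.nil_append, List.foldl_cons, List.foldl_nil, altStep_nl]
    simp [mySplit, chk, stepLine]
  | cons c rest ih =>
    intro e v
    by_cases hn : c = '\n'
    · subst hn
      simp only [List.cons_append, List.foldl_cons, altStep_nl]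
      cases hbs : badSt e v
      · rw [ih 0 []]
        simp [mySplit, chk, stepLine, hbs]
      · rw [foldl_altStep_found]
        simp [mySplit, chk, stepLine, hbs]
    · by_cases he : c = '='
      · subst he
        simp only [List.cons_append, List.foldl_cons]
        rw [show altStep (false, e, v) '=' = (false, e + 1, []) by simp [altStep]]
        rw [ih (e + 1) []]
        have hne := mySplit_ne_nil '\n' rest
        cases hms : mySplit '\n' rest with
        | nil => exact absurd hms hne
        | cons h t =>
          rw [show mySplit '\n' ('=' :: rest) = ('=' :: h) :: t by simp [mySplit, hms]]
          simp [chk, stepLine]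
      · simp only [List.cons_append, List.foldl_cons]
        rw [show altStep (false, e, v) c = (false, e, v ++ [c]) by simp [altStep, hn, he]]
        rw [ih e (v ++ [c])]
        have hne := mySplit_ne_nil '\n' rest
        cases hms : mySplit '\n' rest with
        | nil => exact absurd hms hne
        | cons h t =>
          rw [show mySplit '\n' (c :: rest) = (c :: h) :: t by simp [mySplit, hn, hms]]
          simp [chk, stepLine, he]

theorem stepLine_mySplit (f : List Char) :
    ∀ e v h t, mySplit '=' f = h :: t →
      stepLine e v f = (e + (t.length : Int), t.getLastD (v ++ h)) := by
  induction f with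
  | nil =>
    intro e v h t hms
    simp [mySplit] at hms
    obtain ⟨rfl, rfl⟩ := hms
    simp [stepLine]
  | cons c rest ih =>
    intro e v h t hms
    have hne := mySplit_ne_nil '=' rest
    cases hmr : mySplit '=' rest with
    | nil => exact absurd hmr hne
    | cons hr tr =>
      by_cases he : c = '='
      · subst he
        rw [show mySplit '=' ('=' :: rest) = [] :: hr :: tr by simp [mySplit, hmr]] at hms
        injection hms with hms1 hms2
        subst hms1
        subst hms2
        rw [show stepLine e v ('=' :: rest) = stepLine (e + 1) [] rest by simp [stepLine]]
        rw [ih (e + 1) [] hr tr hmr]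
        simp only [Prod.mk.injEq, List.getLastD_cons, List.length_cons, List.nil_append,
          List.append_nil]
        constructor
        · push_cast; ring
        · trivial
      · rw [show mySplit '=' (c :: rest) = (c :: hr) :: tr by simp [mySplit, he, hmr]] at hms
        injection hms with hms1 hms2
        subst hms1
        subst hms2
        rw [show stepLine e v (c :: rest) = stepLine e (v ++ [c]) rest by simp [stepLine, he]]
        rw [ih e (v ++ [c]) hr tr hmr]
        cases tr with
        | nil => simp
        | cons x xs => simp

-- A's per-field test
def lineBadA (field : List Char) : Bool :=
  match PySem.Chars.splitOn field ['='] with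
  | [_, value] => decide (value = "null".toList ∨ value = [])
  | _ => false

theorem badSt_stepLine_eq_lineBadA (f : List Char) :
    badSt (stepLine 0 [] f).1 (stepLine 0 [] f).2 = lineBadA f := by
  have hne := mySplit_ne_nil '=' f
  cases hms : mySplit '=' f with
  | nil => exact absurd hms hne
  | cons h t =>
    rw [stepLine_mySplit f 0 [] h t hms]
    unfold lineBadA
    rw [splitOn_eq_mySplit, hms]
    cases t with
    | nil => simp [badSt]
    | cons x xs =>
      cases xs with
      | nil =>
        simp only [badSt, List.getLastD_cons, List.getLastD_nil]
        simp [or_comm]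
      | cons y ys =>
        simp only [badSt]
        have : (0 : Int) + ((y :: ys).length + 1 : Nat) ≠ 1 := by
          simp; omega
        simp_all

theorem chk_eq_any (fs : List (List Char)) :
    chk 0 [] fs = fs.any lineBadA := by
  induction fs with
  | nil => rfl
  | cons f rest ih =>
    simp only [chk, List.any_cons, ih, badSt_stepLine_eq_lineBadA]

-- ===== VERDICT (by name: the statement is the Claim_ definition above) =====
theorem has_invalid_values_spec : Claim_equal_has_invalid_values := by
  intro input_str _
  unfold Spec_has_invalid_values has_invalid_values has_invalid_values_alt
  rw [foldl_altStep_chk, chk_eq_any, splitOn_eq_mySplit]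
  rfl
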